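-- pv_equiv track=rewrite | github.com/raresrosca/CtCI | leetcodes/trapping_rain_water.py | matrix_from_array
-- ===== SOURCE A (Python) =====
-- def matrix_from_array(arr):
--     """Transforms the input array into a matrix"""
--     height = max(arr)
--     width = len(arr)
--     mat = [[0 for i in range(width)] for j in range(height)]
--
--     for col in range(len(arr)):
--         for row in range(arr[col]):
--             mat[row][col] += 1
--     return mat
-- ===== SOURCE B (Python) =====
-- def matrix_from_array(arr):
--     """Transforms the input array into a matrix"""
--     height = max(arr)
--     return [[1 if h > row else 0 for h in arr] for row in range(height)]
-- ===== Notes on version B (the rewrite author's own statement) =====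
-- stated objective: idiomatic
-- what changed: Builds the matrix row by row with a direct per-cell comparison (1 if h > row else 0), inverting the loop nesting, instead of pre-allocating a zero matrix and incrementing cells column by column.
import Mathlib
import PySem

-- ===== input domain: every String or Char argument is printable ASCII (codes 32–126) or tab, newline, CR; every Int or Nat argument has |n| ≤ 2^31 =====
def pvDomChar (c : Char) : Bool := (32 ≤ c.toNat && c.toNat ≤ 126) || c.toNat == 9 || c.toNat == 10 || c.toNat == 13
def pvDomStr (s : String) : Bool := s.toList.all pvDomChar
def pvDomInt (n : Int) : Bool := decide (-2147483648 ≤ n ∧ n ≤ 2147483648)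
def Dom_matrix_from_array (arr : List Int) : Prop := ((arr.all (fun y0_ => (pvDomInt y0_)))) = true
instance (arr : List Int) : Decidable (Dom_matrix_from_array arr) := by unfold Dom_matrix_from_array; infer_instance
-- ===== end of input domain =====

-- B builds the matrix row by row with a direct per-cell comparison instead of
-- incrementing into a pre-allocated zero matrix column by column (idiomatic).

-- ===== PORT A =====
-- mat[row][col] += 1 : exact here because in A's loops 0 ≤ row < arr[col] ≤ height
-- and 0 ≤ col < width, so both indices are always in range (Python never raises).
def pvInc2 (mat : List (List Int)) (row col : Int) : List (List Int) :=
  match PySem.List.pyGet? mat row with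
  | none => mat
  | some r =>
    match PySem.List.pyGet? r col with
    | none => mat
    | some v => mat.set row.toNat (r.set col.toNat (v + 1))

def matrix_from_array (arr : List Int) : List (List Int) :=
  match PySem.List.max? arr (fun x => x) with
  | none => []        -- max(arr) raises ValueError on []; excluded by Pre_
  | some height =>
    let width : Int := arr.length
    let mat : List (List Int) :=
      (PySem.List.pyRange 0 height 1).map
        (fun _ => (PySem.List.pyRange 0 width 1).map (fun _ => (0 : Int)))
    (PySem.List.pyRange 0 (arr.length : Int) 1).foldl
      (fun m col =>
        (PySem.List.pyRange 0 (PySem.List.pyGetD arr col 0) 1).foldl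
          (fun m' row => pvInc2 m' row col) m) mat

-- ===== PORT B =====
def matrix_from_array_alt (arr : List Int) : List (List Int) :=
  match PySem.List.max? arr (fun x => x) with
  | none => []        -- max(arr) raises ValueError on []; excluded by Pre_
  | some height =>
    (PySem.List.pyRange 0 height 1).map
      (fun row => arr.map (fun h => if h > row then 1 else 0))

-- ===== PRECONDITION & SPEC =====
-- Pre_ excludes only the empty list, on which Python A (and B) raise ValueError from max(arr).
def Pre_matrix_from_array (arr : List Int) : Prop := arr ≠ []
instance (arr : List Int) : Decidable (Pre_matrix_from_array arr) := by
  unfold Pre_matrix_from_array; infer_instance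
def pvWitness_matrix_from_array : List Int := ([2, 0, 3])

def Spec_matrix_from_array (arr : List Int) (out : List (List Int)) : Prop := out = matrix_from_array_alt arr
instance (arr : List Int) (out : List (List Int)) : Decidable (Spec_matrix_from_array arr out) := by unfold Spec_matrix_from_array; infer_instance

-- ===== CLAIM (what is proved, stated in full; the proofs are below) =====
def Claim_equal_matrix_from_array : Prop := ∀ (arr : List Int), Dom_matrix_from_array arr → Pre_matrix_from_array arr → Spec_matrix_from_array arr (matrix_from_array arr)


-- ===== LEMMAS AND PROOFS =====

-- entry (r, c) of a matrix, as an Option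
def pvGet2 (mat : List (List Int)) (r c : Nat) : Option Int :=
  match mat[r]? with
  | none => none
  | some row => row[c]?

theorem pvRangeNat (t : Int) :
    PySem.List.pyRange 0 t 1 = (List.range t.toNat).map (fun k : Nat => (k : Int)) := by
  rw [PySem.List.pyRange_one]
  have h : t - 0 = t := by ring
  rw [h]
  exact List.map_congr_left fun k _ => zero_add _

theorem pvGet2_inc2 (mat : List (List Int)) (row col : Int)
    (hr : 0 ≤ row) (hc : 0 ≤ col) (r c : Nat) :
    pvGet2 (pvInc2 mat row col) r c
      = (pvGet2 mat r c).map
          (fun v => if r = row.toNat ∧ c = col.toNat then v + 1 else v) := by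
  unfold pvInc2
  rw [PySem.List.pyGet?_of_nonneg _ hr]
  cases hrow : mat[row.toNat]? with
  | none =>
    unfold pvGet2
    cases hmr : mat[r]? with
    | none => simp
    | some rw' =>
      have : ¬ (r = row.toNat) := by
        intro h; subst h; rw [hmr] at hrow; cases hrow
      simp [this]
  | some rowL =>
    dsimp only
    rw [PySem.List.pyGet?_of_nonneg _ hc]
    cases hv : rowL[col.toNat]? with
    | none =>
      unfold pvGet2
      cases hmr : mat[r]? with
      | none => simp
      | some rw' =>
        by_cases h1 : r = row.toNat
        · subst h1
          rw [hmr] at hrow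
          injection hrow with hrow; subst hrow
          by_cases h2 : c = col.toNat
          · subst h2; simp [hv]
          · simp [h2]
        · simp [h1]
    | some v =>
      unfold pvGet2
      have hrl : row.toNat < mat.length := by
        by_contra h
        rw [List.getElem?_eq_none (by omega)] at hrow; cases hrow
      by_cases h1 : r = row.toNat
      · subst h1
        rw [List.getElem?_set_self (by omega), hrow]
        dsimp only
        by_cases h2 : c = col.toNat
        · subst h2
          have hcl : col.toNat < rowL.length := by
            by_contra h
            rw [List.getElem?_eq_none (by omega)] at hv; cases hv
          rw [List.getElem?_set_self (by omega), hv]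
          simp
        · rw [List.getElem?_set_ne (by omega)]
          simp [h2]
      · rw [List.getElem?_set_ne (by omega)]
        cases hmr : mat[r]? with
        | none => simp
        | some rw' => simp [h1]

-- the inner row-loop, pointwise (Nat range form)
theorem pvGet2_inner (mat : List (List Int)) (col : Int) (hc : 0 ≤ col)
    (n : Nat) (r c : Nat) :
    pvGet2 (((List.range n).map (fun k : Nat => (k : Int))).foldl
        (fun m' row => pvInc2 m' row col) mat) r c
      = (pvGet2 mat r c).map
          (fun v => if r < n ∧ c = col.toNat then v + 1 else v) := by
  induction n generalizing mat with
  | zero => cases h : pvGet2 mat r c <;> simp [h]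
  | succ m ih =>
    rw [List.range_succ, List.map_append, List.foldl_append]
    simp only [List.map_cons, List.map_nil, List.foldl_cons, List.foldl_nil]
    rw [pvGet2_inc2 _ _ _ (by positivity) hc, ih]
    cases h : pvGet2 mat r c with
    | none => simp
    | some v =>
      simp only [Option.map_some, Option.some.injEq, Int.toNat_natCast]
      by_cases h2 : c = col.toNat
      · by_cases h1 : r < m
        · have h3 : ¬ (r = m) := by omega
          simp [h1, h2, h3, Nat.lt_succ_of_lt h1]
        · by_cases h3 : r = m
          · simp [h2, h3]
          · have h4 : ¬ (r < m + 1) := by omega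
            simp [h1, h2, h3, h4]
      · simp [h2]

-- the outer column-loop, pointwise (Nat range form)
theorem pvGet2_outer (arr : List Int) (mat : List (List Int)) (n : Nat) (r c : Nat) :
    pvGet2 (((List.range n).map (fun k : Nat => (k : Int))).foldl
        (fun m col =>
          (PySem.List.pyRange 0 (PySem.List.pyGetD arr col 0) 1).foldl
            (fun m' row => pvInc2 m' row col) m) mat) r c
      = (pvGet2 mat r c).map
          (fun v => if c < n ∧ (r : Int) < PySem.List.pyGetD arr (c : Int) 0
                    then v + 1 else v) := by
  induction n generalizing mat with
  | zero => cases h : pvGet2 mat r c <;> simp [h]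
  | succ m ih =>
    rw [List.range_succ, List.map_append, List.foldl_append]
    simp only [List.map_cons, List.map_nil, List.foldl_cons, List.foldl_nil]
    rw [pvRangeNat, pvGet2_inner _ _ (by positivity), ih]
    cases h : pvGet2 mat r c with
    | none => simp
    | some v =>
      simp only [Option.map_some, Option.some.injEq, Int.toNat_natCast]
      by_cases h2 : c = m
      · subst h2
        have hnot : ¬ (c < c) := by omega
        by_cases h1 : (r : Int) < PySem.List.pyGetD arr (c : Int) 0
        · simp
        · simp
      · by_cases h1 : c < m
        · simp [h1, h2, Nat.lt_succ_of_lt h1]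
        · have h3 : ¬ (c < m + 1) := by omega
          simp [h1, h2, h3]

-- folding over a list with a length-preserving step preserves length
theorem pvLength_foldl {α : Type} (f : List (List Int) → α → List (List Int))
    (hf : ∀ m x, (f m x).length = m.length) (l : List α) (mat : List (List Int)) :
    (l.foldl f mat).length = mat.length := by
  induction l generalizing mat with
  | nil => rfl
  | cons x t ih => rw [List.foldl_cons, ih, hf]

theorem pvInc2_length (mat : List (List Int)) (row col : Int) :
    (pvInc2 mat row col).length = mat.length := by
  unfold pvInc2
  split
  · rfl
  · split
    · rfl
    · simp

-- ===== VERDICT (by name: the statement is the Claim_ definition above) =====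
theorem matrix_from_array_spec : Claim_equal_matrix_from_array := by
  intro arr _ _
  unfold Spec_matrix_from_array matrix_from_array matrix_from_array_alt
  cases hmax : PySem.List.max? arr (fun x => x) with
  | none => rfl
  | some height =>
    simp only
    rw [PySem.List.pyRange_zero_natCast]
    set L : List Int := (List.range arr.length).map (fun k : Nat => (k : Int)) with hL
    set mat0 : List (List Int) :=
      (PySem.List.pyRange 0 height 1).map (fun _ => L.map (fun _ => (0 : Int))) with hmat0
    set A : List (List Int) := L.foldl
      (fun m col =>
        (PySem.List.pyRange 0 (PySem.List.pyGetD arr col 0) 1).foldl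
          (fun m' row => pvInc2 m' row col) m) mat0 with hA
    have hlen0 : mat0.length = height.toNat := by
      rw [hmat0]; simp [PySem.List.length_pyRange_one]
    have hlenA : A.length = height.toNat := by
      rw [hA, pvLength_foldl, hlen0]
      intro m col
      apply pvLength_foldl
      intro m' row
      exact pvInc2_length m' row col
    apply List.ext_getElem?
    intro r
    by_cases hr : r < height.toNat
    · have hrA : r < A.length := by omega
      rw [List.getElem?_eq_getElem hrA, List.getElem?_map,
          PySem.List.getElem?_pyRange_one, if_pos (show r < (height - 0).toNat by omega)]
      simp only [Option.map_some, Option.some.injEq, zero_add]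
      apply List.ext_getElem?
      intro c
      have hAc : (A[r]'hrA)[c]? = pvGet2 A r c := by
        unfold pvGet2
        rw [List.getElem?_eq_getElem hrA]
      rw [hAc, hA, hL, pvGet2_outer]
      have hmat0rc : pvGet2 mat0 r c = if c < arr.length then some 0 else none := by
        unfold pvGet2
        rw [hmat0, List.getElem?_map, PySem.List.getElem?_pyRange_one,
            if_pos (show r < (height - 0).toNat by omega)]
        simp only [Option.map_some]
        rw [hL, List.getElem?_map, List.getElem?_map]
        by_cases hc : c < arr.length
        · rw [List.getElem?_eq_getElem (by simpa using hc)]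
          simp [hc]
        · rw [List.getElem?_eq_none (by simpa using hc)]
          simp [hc]
      rw [hmat0rc, List.getElem?_map]
      by_cases hc : c < arr.length
      · have hget : PySem.List.pyGetD arr (c : Int) 0 = arr[c] := by
          rw [PySem.List.pyGetD_of_nonneg _ _ (by positivity)]
          simp [List.getD, List.getElem?_eq_getElem hc]
        rw [if_pos hc, List.getElem?_eq_getElem hc]
        simp only [Option.map_some, hget, hc, true_and, Option.some.injEq]
        by_cases hlt : (r : Int) < arr[c]
        · rw [if_pos hlt, if_pos hlt]; norm_num
        · rw [if_neg hlt, if_neg hlt]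
      · rw [if_neg hc, List.getElem?_eq_none (by omega)]
        simp
    · rw [List.getElem?_eq_none (by omega),
          List.getElem?_eq_none (by simp [PySem.List.length_pyRange_one]; omega)]
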